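-- pv_equiv track=rewrite | github.com/avncharlie/PeAR | pear/tools/ghidra_compare/ghidra_compare.py | get_ranges
-- ===== SOURCE A (Python) =====
-- def get_ranges(inference):
--     """
--     inference: {addr:int -> "code"/"data"}
--     returns   : [(lo:int, hi:int, kind:str), ...]  with no gaps
--                hi is inclusive; the next run (if any) starts at hi+1.
--     """
--     if not inference:
--         return []
--     addrs = sorted(inference)
--     ranges = []
--     cur_kind = inference[addrs[0]]
--     range_start = addrs[0]
--     for idx in range(1, len(addrs)):
--         addr      = addrs[idx]
--         this_kind = inference[addr]
--         if this_kind != cur_kind: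
--             # close the previous run right before the first addr of the new kind
--             ranges.append((range_start, addr - 1, cur_kind))
--             range_start = addr
--             cur_kind    = this_kind
--     # flush the final run
--     ranges.append((range_start, addrs[-1], cur_kind))
--     return ranges
-- ===== SOURCE B (Python) =====
-- def get_ranges(inference):
--     if not inference:
--         return []
--     addrs = sorted(inference)
--     # pass 1: run boundaries -- (start address, kind) wherever the kind changes
--     starts = [(a, inference[a]) for i, a in enumerate(addrs)
--               if i == 0 or inference[a] != inference[addrs[i - 1]]]
--     # pass 2: pair adjacent boundaries; each run ends just before the next one starts
--     mids = [(lo, nxt - 1, kind) for (lo, kind), (nxt, _) in zip(starts, starts[1:])]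
--     return mids + [(starts[-1][0], addrs[-1], starts[-1][1])]
-- ===== Notes on version B (the rewrite author's own statement) =====
-- stated objective: alternative
-- what changed: Replaces A's single fold that threads (ranges, range_start, cur_kind) state with a stateless two-pass decomposition: collect the run-start boundaries (enumerate/filter against each predecessor's kind), then zip adjacent boundaries to derive each run's inclusive hi, appending the final run closed at addrs[-1].
import Mathlib
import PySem

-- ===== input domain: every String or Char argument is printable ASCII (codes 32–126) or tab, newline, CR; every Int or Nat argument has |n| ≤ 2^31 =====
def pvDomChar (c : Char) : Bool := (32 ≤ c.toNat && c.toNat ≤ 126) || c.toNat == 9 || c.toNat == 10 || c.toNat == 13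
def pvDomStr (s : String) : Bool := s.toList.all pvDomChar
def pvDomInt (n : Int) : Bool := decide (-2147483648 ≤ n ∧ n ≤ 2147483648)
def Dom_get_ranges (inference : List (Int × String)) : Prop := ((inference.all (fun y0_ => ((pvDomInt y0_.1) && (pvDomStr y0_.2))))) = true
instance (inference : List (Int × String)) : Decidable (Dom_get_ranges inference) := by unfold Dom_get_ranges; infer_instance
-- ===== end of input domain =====

-- B rebuilds the ranges in two passes (collect run-start boundaries, then zip adjacent
-- boundaries) instead of A's single fold carrying (ranges, range_start, cur_kind); same cost.

-- ===== PORT A =====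
def get_ranges (inference : List (Int × String)) : List (Int × Int × String) :=
  if inference = [] then []
  else
    let d := PySem.Dict.ofList inference
    let addrs := PySem.List.sorted d.keys (fun x => x) false
    let cur_kind := d.getD (PySem.List.pyGetD addrs 0 0) ""
    let range_start := PySem.List.pyGetD addrs 0 0
    let st := (PySem.List.pyRange 1 (PySem.List.len addrs) 1).foldl
      (fun (st : List (Int × Int × String) × Int × String) idx =>
        let addr := PySem.List.pyGetD addrs idx 0
        let this_kind := d.getD addr ""
        if this_kind ≠ st.2.2 then (st.1 ++ [(st.2.1, addr - 1, st.2.2)], addr, this_kind)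
        else st)
      ([], range_start, cur_kind)
    st.1 ++ [(st.2.1, PySem.List.pyGetD addrs (-1) 0, st.2.2)]

-- ===== PORT B =====
def get_ranges_alt (inference : List (Int × String)) : List (Int × Int × String) :=
  if inference = [] then []
  else
    let d := PySem.Dict.ofList inference
    let addrs := PySem.List.sorted d.keys (fun x => x) false
    -- pass 1: run boundaries — (address, kind) wherever the kind changes
    let starts := ((PySem.List.enumerate addrs 0).filter
        (fun p => p.1 == 0 || d.getD p.2 "" != d.getD (PySem.List.pyGetD addrs (p.1 - 1) 0) "")).map
        (fun p => (p.2, d.getD p.2 ""))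
    -- pass 2: pair adjacent boundaries; each run ends just before the next one starts
    let mids := (starts.zip (PySem.List.slice starts (some 1) none)).map
        (fun q => (q.1.1, q.2.1 - 1, q.1.2))
    mids ++ [((PySem.List.pyGetD starts (-1) (0, "")).1, PySem.List.pyGetD addrs (-1) 0,
              (PySem.List.pyGetD starts (-1) (0, "")).2)]

-- ===== PRECONDITION & SPEC =====
def Spec_get_ranges (inference : List (Int × String)) (out : List (Int × Int × String)) : Prop := out = get_ranges_alt inference
instance (inference : List (Int × String)) (out : List (Int × Int × String)) : Decidable (Spec_get_ranges inference out) := by unfold Spec_get_ranges; infer_instance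

-- ===== CLAIM (what is proved, stated in full; the proofs are below) =====
def Claim_equal_get_ranges : Prop := ∀ (inference : List (Int × String)), Dom_get_ranges inference → Spec_get_ranges inference (get_ranges inference)

-- ===== LEMMAS AND PROOFS =====

/-- Run-start boundaries of `l`, given the current run's kind `k`. -/
def pvRunStarts (f : Int → String) (k : String) : List Int → List (Int × String)
  | [] => []
  | x :: t => if f x ≠ k then (x, f x) :: pvRunStarts f (f x) t else pvRunStarts f k t

/-- Turn the boundary list into ranges: each run ends one before the next run's start,
the last run ends at `L`. -/
def pvBuild : List (Int × String) → Int → List (Int × Int × String)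
  | [], _ => []
  | [(s, k)], L => [(s, L, k)]
  | (s, k) :: (s', k') :: ss, L => (s, s' - 1, k) :: pvBuild ((s', k') :: ss) L

theorem pv_contains_update (ps : List (Int × String)) (d : PySem.Dict Int String) (k : Int)
    (h : d.contains k = true) : (d.update ps).contains k = true := by
  induction ps generalizing d with
  | nil => exact h
  | cons p rest ih =>
    have hstep : d.update (p :: rest) = (d.insert p.1 p.2).update rest := rfl
    rw [hstep]
    exact ih _ (by rw [PySem.Dict.contains_insert]; simp [h])

theorem pv_keys_ne_nil (ps : List (Int × String)) (h : ps ≠ []) :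
    (PySem.Dict.ofList ps).keys ≠ [] := by
  obtain ⟨p, rest, rfl⟩ := List.exists_cons_of_ne_nil h
  have h1 : (PySem.Dict.ofList (p :: rest)).contains p.1 = true := by
    show ((PySem.Dict.empty.insert p.1 p.2).update rest).contains p.1 = true
    exact pv_contains_update rest _ _ (PySem.Dict.contains_insert_self _ _ _)
  rw [PySem.Dict.contains_iff_mem_keys] at h1
  intro hk; rw [hk] at h1; simp at h1

/-- A's fold, finished with the flush line, equals `pvBuild` of the boundary list. -/
theorem pv_loopA (f : Int → String) (t : List Int) :
    ∀ (acc : List (Int × Int × String)) (s0 : Int) (k0 : String) (L : Int),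
    (let st := t.foldl
        (fun (st : List (Int × Int × String) × Int × String) x =>
          if f x ≠ st.2.2 then (st.1 ++ [(st.2.1, x - 1, st.2.2)], x, f x) else st)
        (acc, s0, k0)
     st.1 ++ [(st.2.1, L, st.2.2)])
    = acc ++ pvBuild ((s0, k0) :: pvRunStarts f k0 t) L := by
  induction t with
  | nil => intro acc s0 k0 L; rfl
  | cons x t ih =>
    intro acc s0 k0 L
    simp only [List.foldl_cons, pvRunStarts]
    by_cases hx : f x ≠ k0
    · simp only [if_pos hx]
      rw [ih (acc ++ [(s0, x - 1, k0)]) x (f x) L]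
      simp [pvBuild]
    · simp only [if_neg hx]
      exact ih acc s0 k0 L

/-- B's zip-of-adjacent-boundaries plus final element equals `pvBuild`. -/
theorem pv_zipB (L : Int) : ∀ (starts : List (Int × String)) (h : starts ≠ []),
    (starts.zip starts.tail).map (fun q => (q.1.1, q.2.1 - 1, q.1.2))
      ++ [((starts.getLast h).1, L, (starts.getLast h).2)]
    = pvBuild starts L := by
  intro starts
  induction starts with
  | nil => intro h; exact absurd rfl h
  | cons p ss ih =>
    intro _
    match ss, ih with
    | [], _ => simp [pvBuild]
    | q :: ss', ih =>
      simp only [List.tail_cons, List.zip_cons_cons, List.map_cons]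
      rw [List.getLast_cons (by simp)]
      have := ih (by simp)
      simp only [List.tail_cons] at this
      rw [List.cons_append, this]
      obtain ⟨s, k⟩ := p; obtain ⟨s', k'⟩ := q
      simp [pvBuild]

/-- B's enumerate/filter over the tail, with the predicate indexing the predecessor,
    equals `pvRunStarts` of the previous element's kind. -/
theorem pv_startsB (f : Int → String) (addrs : List Int) :
    ∀ (t pre : List Int) (prev : Int), addrs = pre ++ prev :: t →
    ((PySem.List.enumerate t ((pre.length : Int) + 1)).filter
        (fun p => p.1 == 0 || f p.2 != f (PySem.List.pyGetD addrs (p.1 - 1) 0))).map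
        (fun p => (p.2, f p.2))
    = pvRunStarts f (f prev) t := by
  intro t
  induction t with
  | nil => intro pre prev _; simp [PySem.List.enumerate, pvRunStarts]
  | cons x t ih =>
    intro pre prev heq
    rw [PySem.List.enumerate_cons, List.filter_cons]
    have hget : PySem.List.pyGetD addrs ((pre.length : Int) + 1 - 1) 0 = prev := by
      have h1 : ((pre.length : Int) + 1 - 1) = ((pre.length : Nat) : Int) := by ring
      rw [h1, PySem.List.pyGetD_natCast, heq]
      simp [List.getD]
    have hz : ((pre.length : Int) + 1 == 0) = false := by simp; omega
    have hih := ih (pre ++ [prev]) x (by simpa using heq)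
    have hlen : (((pre ++ [prev]).length : Nat) : Int) + 1 = (pre.length : Int) + 1 + 1 := by
      simp
    rw [hlen] at hih
    simp only [hz, hget, Bool.false_or]
    simp only [pvRunStarts]
    by_cases hx : f x = f prev
    · rw [if_neg (by simp [hx]), if_neg (by simp [hx])]
      rw [hx] at hih; exact hih
    · rw [if_pos (by simp [hx]), if_pos (by simp [hx]), List.map_cons]
      rw [hih]

-- ===== VERDICT (by name: the statement is the Claim_ definition above) =====
theorem get_ranges_spec : Claim_equal_get_ranges := by
  intro inference _
  unfold Spec_get_ranges get_ranges get_ranges_alt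
  by_cases hne : inference = []
  · simp [hne]
  · simp only [if_neg hne]
    set d := PySem.Dict.ofList inference with hd
    set addrs := PySem.List.sorted d.keys (fun x => x) false with haddrs
    have hkeys : d.keys ≠ [] := pv_keys_ne_nil inference hne
    have hane : addrs ≠ [] := by
      rw [haddrs, Ne, PySem.List.sorted_eq_nil_iff]; exact hkeys
    obtain ⟨a0, rest, hcons⟩ := List.exists_cons_of_ne_nil hane
    set f : Int → String := fun a => d.getD a "" with hf
    -- A side
    rw [PySem.List.foldl_pyRange_pyGetD addrs 0
      (fun (st : List (Int × Int × String) × Int × String) x =>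
        if f x ≠ st.2.2 then (st.1 ++ [(st.2.1, x - 1, st.2.2)], x, f x) else st)
      _ (by norm_num)]
    rw [hcons]
    simp only [Int.toNat_one, List.drop_succ_cons, List.drop_zero,
      PySem.List.pyGetD_zero_cons]
    rw [pv_loopA f rest [] a0 (f a0) (PySem.List.pyGetD (a0 :: rest) (-1) 0)]
    -- B side
    rw [PySem.List.slice_from_one]
    have hstarts : ((PySem.List.enumerate (a0 :: rest) 0).filter
        (fun p => p.1 == 0 || f p.2 != f (PySem.List.pyGetD (a0 :: rest) (p.1 - 1) 0))).map
        (fun p => (p.2, f p.2))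
      = (a0, f a0) :: pvRunStarts f (f a0) rest := by
      rw [PySem.List.enumerate_cons, List.filter_cons]
      simp only [beq_self_eq_true, Bool.true_or, if_pos, List.map_cons]
      congr 1
      have := pv_startsB f (a0 :: rest) rest [] a0 (by simp)
      simpa using this
    rw [hstarts]
    have hlast : ((a0, f a0) :: pvRunStarts f (f a0) rest) ≠ [] := by simp
    rw [PySem.List.pyGetD_neg_one _ _ hlast]
    rw [List.nil_append]
    exact (pv_zipB (PySem.List.pyGetD (a0 :: rest) (-1) 0) _ hlast).symm
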